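-- pv_equiv track=rewrite | github.com/HuEetu/wrong-qbit-connection | connectionhelper.py | findConnectableQubits
-- ===== SOURCE A (Python) =====
-- import itertools
--
-- def findConnectableQubits(connections, needed):
-- 	combinations = itertools.combinations(range(len(connections)), needed)
--
-- 	possibleQubits = []
-- 	for c in combinations:
-- 		c_set = set(c)
-- 		all_connected = True
-- 		for q in c:
-- 			qubits = set(connections[q])
-- 			qubits.add(q)
-- 			is_connected = c_set.issubset(qubits)
-- 			all_connected = all_connected and is_connected
--
--
-- 		if (all_connected):
-- 			possibleQubits.append(c_set)
--
-- 	return possibleQubits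
-- ===== SOURCE B (Python) =====
-- def findConnectableQubits(connections, needed):
-- 	# Backtracking clique search over mutual-neighbour candidate lists, increasing-index order.
-- 	# Neighbour sets are computed lazily (memoised), only for vertices the search actually expands.
-- 	n = len(connections)
--
-- 	sets = {}
-- 	def set_of(i):
-- 		if i not in sets:
-- 			sets[i] = set(connections[i])
-- 		return sets[i]
--
-- 	mutual = {}
-- 	def mutual_of(i):
-- 		if i not in mutual:
-- 			mutual[i] = set(j for j in connections[i] if 0 <= j < n and j != i and i in set_of(j))
-- 		return mutual[i]
--
-- 	result = []
--
-- 	def extend(clique, cand):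
-- 		if len(clique) == needed:
-- 			result.append(set(clique))
-- 			return
-- 		if needed - len(clique) > len(cand):
-- 			return  # not enough candidates left to complete a clique
-- 		for j in cand:
-- 			nxt = clique + [j]
-- 			if len(nxt) == needed:
-- 				result.append(set(nxt))
-- 			else:
-- 				mj = mutual_of(j)
-- 				extend(nxt, [m for m in cand if m > j and m in mj])
--
-- 	extend([], list(range(n)))
-- 	return result
-- ===== Notes on version B (the rewrite author's own statement) =====
-- stated objective: alternative
-- what changed: A materialises every C(n, needed) index combination and re-checks each with an O(k^2) subset test; B runs a backtracking clique search in increasing-index order, extending a partial clique only along candidate lists filtered through lazily computed mutual-neighbour sets, with a prune when too few candidates remain.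
import Mathlib
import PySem

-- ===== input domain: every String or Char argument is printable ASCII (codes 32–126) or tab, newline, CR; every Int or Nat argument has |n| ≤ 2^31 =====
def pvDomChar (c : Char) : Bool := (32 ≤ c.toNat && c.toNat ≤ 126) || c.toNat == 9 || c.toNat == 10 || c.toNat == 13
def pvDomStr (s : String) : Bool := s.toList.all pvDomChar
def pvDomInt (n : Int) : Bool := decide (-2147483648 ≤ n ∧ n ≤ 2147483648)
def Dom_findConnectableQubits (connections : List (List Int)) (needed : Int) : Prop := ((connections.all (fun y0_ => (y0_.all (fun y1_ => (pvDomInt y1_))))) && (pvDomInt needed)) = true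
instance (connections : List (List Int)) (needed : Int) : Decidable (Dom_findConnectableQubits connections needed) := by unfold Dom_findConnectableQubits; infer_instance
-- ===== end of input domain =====

-- B replaces A's exhaustive scan of all C(n, needed) index combinations by a backtracking
-- clique search that extends cliques along mutual-neighbour candidate lists in increasing-index order.

-- ===== PORT A =====
-- itertools.combinations(l, k) in lexicographic order (l already distinct here)
def pvCombos : Nat → List Int → List (List Int)
  | 0, _ => [[]]
  | _ + 1, [] => []
  | k + 1, x :: xs => (pvCombos k xs).map (fun c => x :: c) ++ pvCombos (k + 1) xs

def findConnectableQubits (connections : List (List Int)) (needed : Int) : List (List Int) :=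
  let combinations := pvCombos needed.toNat (PySem.List.pyRange 0 (PySem.List.len connections) 1)
  combinations.foldl (fun possibleQubits c =>
    let c_set : PySem.Set Int := PySem.Set.ofList c
    let all_connected := c.foldl (fun acc q =>
      -- q comes from range(len(connections)), so connections[q] never raises; default [] unused
      let qubits := PySem.Set.ofList (PySem.List.pyGetD connections q [])
      let qubits := qubits.add q
      let is_connected := c_set.issubset qubits
      acc && is_connected) true
    if all_connected then possibleQubits ++ [(c_set : List Int)] else possibleQubits) []

-- ===== PORT B =====
-- the (memoised) mutual_of(i): which neighbours j of i are mutual and in range.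
-- The Python caches these sets; the cache is pure, so the port computes the same set at each use.
def pvMutualOf (connections : List (List Int)) (i : Int) : PySem.Set Int :=
  PySem.Set.ofList ((PySem.List.pyGetD connections i []).filter (fun j =>
    decide (0 ≤ j) && decide (j < PySem.List.len connections) && j != i &&
      (PySem.Set.ofList (PySem.List.pyGetD connections j [])).contains i))

-- the recursive extend(clique, cand); fuel only makes the recursion structural
-- (cand strictly shrinks at every recursive call, so fuel = cand.length at the top suffices)
def pvExtend (connections : List (List Int)) (needed : Int) :
    Nat → List Int → List Int → List (List Int)
  | fuel, clique, cand =>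
    if (clique.length : Int) = needed then [(PySem.Set.ofList clique : List Int)]
    else if (cand.length : Int) < needed - clique.length then []
    else match fuel with
      | 0 => []
      | fuel + 1 => cand.flatMap (fun j =>
          if (((clique ++ [j]).length : Int)) = needed then [(PySem.Set.ofList (clique ++ [j]) : List Int)]
          else pvExtend connections needed fuel (clique ++ [j])
            (cand.filter (fun m => decide (j < m) && (pvMutualOf connections j).contains m)))

def findConnectableQubits_alt (connections : List (List Int)) (needed : Int) : List (List Int) :=
  let cand := PySem.List.pyRange 0 (PySem.List.len connections) 1
  pvExtend connections needed cand.length [] cand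

-- ===== PRECONDITION & SPEC =====
-- Pre_ excludes needed < 0, on which Python's itertools.combinations raises ValueError.
def Pre_findConnectableQubits (connections : List (List Int)) (needed : Int) : Prop := 0 ≤ needed
instance (connections : List (List Int)) (needed : Int) : Decidable (Pre_findConnectableQubits connections needed) := by unfold Pre_findConnectableQubits; infer_instance

def pvWitness_findConnectableQubits : List (List Int) × Int := ([[1], [0]], 2)

def Spec_findConnectableQubits (connections : List (List Int)) (needed : Int) (out : List (List Int)) : Prop := out = findConnectableQubits_alt connections needed
instance (connections : List (List Int)) (needed : Int) (out : List (List Int)) : Decidable (Spec_findConnectableQubits connections needed out) := by unfold Spec_findConnectableQubits; infer_instance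

-- ===== CLAIM (what is proved, stated in full; the proofs are below) =====
def Claim_equal_findConnectableQubits : Prop := ∀ (connections : List (List Int)) (needed : Int), Dom_findConnectableQubits connections needed → Pre_findConnectableQubits connections needed → Spec_findConnectableQubits connections needed (findConnectableQubits connections needed)

-- ===== LEMMAS AND PROOFS =====

def pvAdjB (connections : List (List Int)) (j m : Int) : Bool :=
  (pvMutualOf connections j).contains m

def pvPairAll (connections : List (List Int)) : List Int → Bool
  | [] => true
  | x :: xs => xs.all (pvAdjB connections x) && pvPairAll connections xs

lemma pvCombos_sublist : ∀ (k : Nat) (l c : List Int), c ∈ pvCombos k l → c.Sublist l := by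
  intro k l
  induction l generalizing k with
  | nil => intro c hc; cases k <;> simp_all [pvCombos]
  | cons x xs ih =>
    intro c hc
    cases k with
    | zero => simp [pvCombos] at hc; simp [hc]
    | succ k =>
      simp [pvCombos] at hc
      rcases hc with ⟨d, hd, rfl⟩ | hc
      · exact (ih k d hd).cons_cons x
      · exact (ih (k+1) c hc).cons x

lemma pvCombos_filter (p : Int → Bool) : ∀ (k : Nat) (l : List Int),
    pvCombos k (l.filter p) = (pvCombos k l).filter (fun c => c.all p) := by
  intro k l
  induction l generalizing k with
  | nil => cases k <;> simp [pvCombos]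
  | cons x xs ih =>
    by_cases hx : p x = true
    · cases k with
      | zero => simp [pvCombos, hx]
      | succ k =>
        simp only [List.filter_cons, hx, if_pos, pvCombos, ih, List.filter_append,
          List.filter_map]
        congr 1
        · rw [List.filter_congr]
          intro c _
          simp [hx]
    · cases k with
      | zero => simp [pvCombos, hx]
      | succ k =>
        have h1 : List.filter p (x :: xs) = List.filter p xs := by simp [hx]
        have h2 : (List.filter ((fun c => c.all p) ∘ fun c => x :: c) (pvCombos k xs)) = [] := by
          apply List.filter_eq_nil_iff.mpr
          intro c _
          simp [hx]
        rw [h1, ih]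
        conv_rhs => rw [pvCombos]
        rw [List.filter_append, List.filter_map, h2]
        simp

lemma pvCombos_nil : ∀ (k : Nat) (l : List Int), l.length < k → pvCombos k l = [] := by
  intro k l
  induction l generalizing k with
  | nil => intro h; obtain ⟨k, rfl⟩ : ∃ m, k = m + 1 := ⟨k - 1, by omega⟩; rfl
  | cons x xs ih =>
    intro h
    obtain ⟨k, rfl⟩ : ∃ m, k = m + 1 := ⟨k - 1, by omega⟩
    simp at h
    rw [pvCombos, ih k (by omega), ih (k+1) (by omega)]
    simp

lemma pvExtend_base (connections : List (List Int)) (needed : Int) (fuel : Nat) (clique cand : List Int)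
    (h : (clique.length : Int) = needed) :
    pvExtend connections needed fuel clique cand = [(PySem.Set.ofList clique : List Int)] := by
  rw [pvExtend.eq_def]; simp [h]

lemma pvExtend_prune (connections : List (List Int)) (needed : Int) (fuel : Nat) (clique cand : List Int)
    (h : ¬ (clique.length : Int) = needed) (h2 : (cand.length : Int) < needed - clique.length) :
    pvExtend connections needed fuel clique cand = [] := by
  rw [pvExtend.eq_def]; simp [h, h2]

lemma pvExtend_succ (connections : List (List Int)) (needed : Int) (fuel : Nat) (clique cand : List Int)
    (h : ¬ (clique.length : Int) = needed) (h2 : ¬ (cand.length : Int) < needed - clique.length) :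
    pvExtend connections needed (fuel + 1) clique cand = cand.flatMap (fun j =>
      pvExtend connections needed fuel (clique ++ [j])
        (cand.filter (fun m => decide (j < m) && (pvMutualOf connections j).contains m))) := by
  rw [pvExtend.eq_def]
  simp only [h, if_false, h2, if_false]
  apply List.flatMap_congr
  intro j hj
  by_cases hb : (((clique ++ [j]).length : Int)) = needed
  · rw [if_pos hb, pvExtend_base connections needed fuel (clique ++ [j]) _ hb]
  · rw [if_neg hb]

lemma pvAlg (connections : List (List Int)) (clique : List Int) (x : Int) (xs : List Int) (K : Nat) :
    List.map (fun c => (PySem.Set.ofList ((clique ++ [x]) ++ c) : List Int))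
      (List.filter (pvPairAll connections) (pvCombos K (List.filter (pvAdjB connections x) xs)))
  = List.map (fun c => (PySem.Set.ofList (clique ++ c) : List Int))
      (List.filter (pvPairAll connections) (List.map (fun c => x :: c) (pvCombos K xs))) := by
  rw [pvCombos_filter, List.filter_filter, List.filter_map, List.map_map]
  apply congrArg₂
  · funext c
    simp [Function.comp, List.append_assoc]
  · apply List.filter_congr
    intro c _
    simp [pvPairAll, Function.comp, Bool.and_comm]

lemma pvExtend_eq (connections : List (List Int)) (needed : Int) :
    ∀ (N : Nat) (cand : List Int), cand.length ≤ N →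
    ∀ (fuel : Nat), cand.length ≤ fuel →
    cand.Pairwise (· < ·) →
    ∀ (clique : List Int), (clique.length : Int) ≤ needed →
    pvExtend connections needed fuel clique cand
      = ((pvCombos (needed - clique.length).toNat cand).filter (pvPairAll connections)).map
          (fun c => (PySem.Set.ofList (clique ++ c) : List Int)) := by
  intro N
  induction N with
  | zero =>
    intro cand hN fuel hf hs clique hlen
    have : cand = [] := List.length_eq_zero_iff.mp (Nat.le_zero.mp hN)
    subst this
    rcases eq_or_lt_of_le hlen with heq | hlt
    · have : (needed - clique.length).toNat = 0 := by omega
      rw [pvExtend_base connections needed fuel clique [] heq]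
      simp [this, pvCombos, pvPairAll]
    · rw [pvExtend_prune connections needed fuel clique [] (by omega) (by simp; omega)]
      rw [pvCombos_nil _ [] (by simp; omega)]
      simp
  | succ N ih =>
    intro cand hN fuel hf hs clique hlen
    rcases eq_or_lt_of_le hlen with heq | hlt
    · have : (needed - clique.length).toNat = 0 := by omega
      rw [pvExtend_base connections needed fuel clique cand heq]
      simp [this, pvCombos, pvPairAll]
    · by_cases hbig : (cand.length : Int) < needed - clique.length
      · rw [pvExtend_prune connections needed fuel clique cand (by omega) hbig]
        rw [pvCombos_nil _ cand (by omega)]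
        simp
      · cases cand with
        | nil =>
          exact absurd hbig (by simp; omega)
        | cons x xs =>
          obtain ⟨f, rfl⟩ : ∃ f, fuel = f + 1 := ⟨fuel - 1, by simp at hf; omega⟩
          have hxlt : ∀ m ∈ xs, x < m := fun m hm => (List.pairwise_cons.mp hs).1 m hm
          have hsx : xs.Pairwise (· < ·) := (List.pairwise_cons.mp hs).2
          rw [pvExtend_succ connections needed f clique (x :: xs) (by omega) hbig,
            List.flatMap_cons]
          have hfilt1 : (x :: xs).filter (fun m => decide (x < m) && (pvMutualOf connections x).contains m)
              = xs.filter (pvAdjB connections x) := by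
            rw [List.filter_cons, if_neg (by simp)]
            apply List.filter_congr
            intro m hm
            simp [pvAdjB, hxlt m hm]
          have hfilt2 : ∀ j ∈ xs, (x :: xs).filter (fun m => decide (j < m) && (pvMutualOf connections j).contains m)
              = xs.filter (fun m => decide (j < m) && (pvMutualOf connections j).contains m) := by
            intro j hj
            rw [List.filter_cons, if_neg (by simp; intro h; exact absurd (hxlt j hj) (by omega))]
          rw [hfilt1]
          -- head call via the outer IH
          have hlen1 : ((clique ++ [x]).length : Int) ≤ needed := by simp; omega
          rw [ih (xs.filter (pvAdjB connections x))
            (le_trans (List.length_filter_le _ _) (by simp at hN; omega)) f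
            (le_trans (List.length_filter_le _ _) (by simp at hf; omega))
            (hsx.filter _) (clique ++ [x]) hlen1]
          have hk : (needed - clique.length).toNat = (needed - (clique ++ [x]).length).toNat + 1 := by
            simp; omega
          rw [hk]
          conv_rhs => rw [pvCombos]
          rw [List.filter_append, List.map_append]
          refine congrArg₂ _ (pvAlg connections clique x xs _) ?_
          -- tail part
          by_cases hxs : (xs.length : Int) < needed - clique.length
          · -- the prune fires one level deeper on every tail branch; RHS tail is empty too
            have htail : (xs.flatMap (fun j =>
                pvExtend connections needed f (clique ++ [j])
                  ((x :: xs).filter (fun m => decide (j < m) && (pvMutualOf connections j).contains m))))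
                = [] := by
              apply List.flatMap_eq_nil_iff.mpr
              intro j hj
              rw [hfilt2 j hj]
              have hxs0 : xs ≠ [] := by rintro rfl; simp at hj
              have hb' : ¬ ((clique ++ [j]).length : Int) = needed := by
                simp only [List.length_append, List.length_cons, List.length_nil]
                have : 1 ≤ xs.length := List.length_pos_iff.mpr hxs0
                simp at hbig
                push_cast
                omega
              apply pvExtend_prune connections needed f (clique ++ [j]) _ hb'
              have hflt : (xs.filter (fun m => decide (j < m) && (pvMutualOf connections j).contains m)).length < xs.length :=
                List.length_filter_lt_length_iff_exists.mpr ⟨j, hj, by simp⟩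
              simp only [List.length_append, List.length_cons, List.length_nil]
              simp at hbig
              push_cast
              omega
            rw [htail]
            have : pvCombos ((needed - (clique ++ [x]).length).toNat + 1) xs = [] := by
              apply pvCombos_nil
              simp; omega
            rw [this, List.filter_nil, List.map_nil]
          · -- tail equals the same search on xs
            have htail : (xs.flatMap (fun j =>
                pvExtend connections needed f (clique ++ [j])
                  ((x :: xs).filter (fun m => decide (j < m) && (pvMutualOf connections j).contains m))))
                = pvExtend connections needed (f + 1) clique xs := by
              rw [pvExtend_succ connections needed f clique xs (by omega) hxs]
              exact (List.flatMap_congr (fun j hj => by rw [hfilt2 j hj])).symm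
            rw [htail, ih xs (by simp at hN; omega) (f+1) (by simp at hf; omega) hsx clique hlen]
            rw [hk]

lemma pvFoldlAnd (f : Int → Bool) (l : List Int) (b : Bool) :
    l.foldl (fun acc q => acc && f q) b = (b && l.all f) := by
  induction l generalizing b with
  | nil => simp
  | cons x xs ih => simp [ih, Bool.and_assoc]

lemma pvPairAll_iff (connections : List (List Int)) (c : List Int) :
    pvPairAll connections c = true ↔ c.Pairwise (fun x y => pvAdjB connections x y = true) := by
  induction c with
  | nil => simp [pvPairAll]
  | cons x xs ih => simp [pvPairAll, List.pairwise_cons, ih, List.all_eq_true, and_comm]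

lemma pvAdjB_iff (connections : List (List Int)) (x y : Int) :
    pvAdjB connections x y = true ↔
      ((0 ≤ y ∧ y < (connections.length : Int)) ∧ y ≠ x ∧
        y ∈ PySem.List.pyGetD connections x [] ∧ x ∈ PySem.List.pyGetD connections y []) := by
  unfold pvAdjB pvMutualOf
  rw [PySem.Set.contains_iff, PySem.Set.mem_ofList, List.mem_filter]
  simp only [Bool.and_eq_true, decide_eq_true_eq, bne_iff_ne, ne_eq, PySem.Set.contains_iff,
    PySem.Set.mem_ofList, PySem.List.len_eq]
  tauto

lemma pvCheck_eq_pairAll (connections : List (List Int)) (c : List Int)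
    (hsub : c.Sublist (PySem.List.pyRange 0 (PySem.List.len connections) 1)) :
    (c.foldl (fun acc q =>
      acc && (PySem.Set.ofList c).issubset
        ((PySem.Set.ofList (PySem.List.pyGetD connections q [])).add q)) true)
      = pvPairAll connections c := by
  have hmem : ∀ x ∈ c, 0 ≤ x ∧ x < (connections.length : Int) := by
    intro x hx
    have := PySem.List.mem_pyRange_one.mp (hsub.subset hx)
    simpa using this
  have hlt : c.Pairwise (· < ·) :=
    (PySem.List.pairwise_lt_pyRange_one 0 (PySem.List.len connections)).sublist hsub
  rw [Bool.eq_iff_iff, pvFoldlAnd, Bool.true_and, List.all_eq_true, pvPairAll_iff]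
  have hsubq : ∀ q ∈ c, ((PySem.Set.ofList c).issubset
      ((PySem.Set.ofList (PySem.List.pyGetD connections q [])).add q) = true ↔
      ∀ p ∈ c, p ∈ PySem.List.pyGetD connections q [] ∨ p = q) := by
    intro q hq
    rw [PySem.Set.issubset_iff]
    constructor
    · intro h p hp
      have := h p ((PySem.Set.mem_ofList c p).mpr hp)
      rw [PySem.Set.mem_add, PySem.Set.mem_ofList] at this
      exact this
    · intro h p hp
      rw [PySem.Set.mem_add, PySem.Set.mem_ofList]
      exact h p ((PySem.Set.mem_ofList c p).mp hp)
  constructor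
  · intro h
    refine hlt.imp_of_mem ?_
    intro x y hx hy hxy
    have hby := hmem y hy
    rw [pvAdjB_iff connections x y]
    have h1 := ((hsubq x hx).mp (h x hx)) y hy
    have h2 := ((hsubq y hy).mp (h y hy)) x hx
    refine ⟨hby, by omega, ?_, ?_⟩
    · rcases h1 with h1 | h1
      · exact h1
      · omega
    · rcases h2 with h2 | h2
      · exact h2
      · omega
  · intro h q hq
    rw [hsubq q hq]
    intro p hp
    by_cases hpq : p = q
    · exact Or.inr hpq
    · left
      have hR : c.Pairwise (fun x y : Int =>
          y ∈ PySem.List.pyGetD connections x [] ∧ x ∈ PySem.List.pyGetD connections y []) := by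
        refine h.imp_of_mem ?_
        intro x y hx hy hxy
        rw [pvAdjB_iff connections x y] at hxy
        exact ⟨hxy.2.2.1, hxy.2.2.2⟩
      have hSym : Symmetric (fun x y : Int =>
          y ∈ PySem.List.pyGetD connections x [] ∧ x ∈ PySem.List.pyGetD connections y []) := by
        intro x y hxy; exact ⟨hxy.2, hxy.1⟩
      exact (hR.forall hSym hq hp (fun hh => hpq (hh.symm))).1

-- ===== VERDICT (by name: the statement is the Claim_ definition above) =====
theorem findConnectableQubits_spec : Claim_equal_findConnectableQubits := by
  intro connections needed _ hpre
  unfold Pre_findConnectableQubits at hpre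
  unfold Spec_findConnectableQubits
  rw [findConnectableQubits, findConnectableQubits_alt]
  simp only []
  rw [PySem.List.foldl_append_if
    (fun c => c.foldl (fun acc q =>
      acc && (PySem.Set.ofList c).issubset
        ((PySem.Set.ofList (PySem.List.pyGetD connections q [])).add q)) true)
    (fun c => (PySem.Set.ofList c : List Int))]
  rw [pvExtend_eq connections needed
    (PySem.List.pyRange 0 (PySem.List.len connections) 1).length
    (PySem.List.pyRange 0 (PySem.List.len connections) 1) le_rfl
    (PySem.List.pyRange 0 (PySem.List.len connections) 1).length le_rfl
    (PySem.List.pairwise_lt_pyRange_one 0 (PySem.List.len connections))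
    [] (by simpa using hpre)]
  simp only [List.length_nil, Int.natCast_zero, sub_zero, List.nil_append]
  congr 1
  apply List.filter_congr
  intro c hc
  exact pvCheck_eq_pairAll connections c (pvCombos_sublist _ _ c hc)
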